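-- pv_equiv track=rewrite | github.com/sammccauley117/daily-coding-problem | solutions/problem_030.py | next_higher
-- ===== SOURCE A (Python) =====
-- def next_higher(x):
--     # Turn off the lowest 1 and turn on the closest 0 to the left of it
--     first_one = None # Bit index of the first one to appear in x
--     for i in range(32):
--         if (x >> i) & 1:
--             first_one = i
--             x = ~(1 << i) & x
--             break
--     if first_one == None: return None # There are no ones
--     for i in range(first_one + 1, 32):
--         if not ((x >> i) & 1):
--             x =  x | (1 << i)
--             return x
--     return None
-- ===== SOURCE B (Python) =====
-- def next_higher(x):
--     # Closed-form bit arithmetic: isolate the lowest set bit of the low 32 bits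
--     # and the first zero bit above it, without scanning bit positions.
--     y = x & 0xFFFFFFFF
--     if y == 0:
--         return None
--     p = (y & -y).bit_length() - 1
--     z = (~x & 0xFFFFFFFF) >> (p + 1)
--     if z == 0:
--         return None
--     q = p + 1 + (z & -z).bit_length() - 1
--     return x - (1 << p) + (1 << q)
-- ===== Notes on version B (the rewrite author's own statement) =====
-- stated objective: alternative
-- what changed: Replaces A's two per-bit scanning loops over the word (find the lowest set bit, then find the next zero bit above it) by loop-free closed bit arithmetic: y & -y with bit_length isolates the lowest set bit of the masked word, and the same trick applied to the shifted complement finds the first zero bit above it.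
import Mathlib
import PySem

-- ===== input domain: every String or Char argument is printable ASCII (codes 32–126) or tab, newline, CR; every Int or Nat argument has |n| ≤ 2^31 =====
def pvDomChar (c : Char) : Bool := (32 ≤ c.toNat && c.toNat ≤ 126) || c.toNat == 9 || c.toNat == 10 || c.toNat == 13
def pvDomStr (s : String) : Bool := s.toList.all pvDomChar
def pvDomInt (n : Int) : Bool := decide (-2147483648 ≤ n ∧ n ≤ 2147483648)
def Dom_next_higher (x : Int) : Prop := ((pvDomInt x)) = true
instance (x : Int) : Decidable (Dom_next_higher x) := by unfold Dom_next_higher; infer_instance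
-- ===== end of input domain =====

-- B replaces A's two per-bit scanning loops by loop-free closed bit arithmetic
-- (lowest-set-bit isolation y & -y and bit_length); objective: alternative algorithm.

-- ===== PORT A =====
-- first loop: for i in range(32): if (x >> i) & 1: first_one = i; x = ~(1 << i) & x; break
def nhLoop1 (x : Int) (i : Nat) : Option (Nat × Int) :=
  if _h : i < 32 then
    if PySem.Int.band (x >>> i) 1 ≠ 0 then
      some (i, PySem.Int.band (Int.not ((1 : Int) <<< i)) x)
    else nhLoop1 x (i + 1)
  else none
termination_by 32 - i

-- second loop: for i in range(first_one + 1, 32): if not ((x >> i) & 1): return x | (1 << i)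
def nhLoop2 (x : Int) (i : Nat) : Option Int :=
  if _h : i < 32 then
    if PySem.Int.band (x >>> i) 1 = 0 then some (PySem.Int.bor x ((1 : Int) <<< i))
    else nhLoop2 x (i + 1)
  else none
termination_by 32 - i

def next_higher (x : Int) : Option Int :=
  match nhLoop1 x 0 with
  | none => none
  | some (first_one, x') => nhLoop2 x' (first_one + 1)

-- ===== PORT B =====
def next_higher_alt (x : Int) : Option Int :=
  let y := PySem.Int.band x 4294967295
  if y = 0 then none else
  let p := PySem.Int.bitLength (PySem.Int.band y (-y)) - 1
  let z := PySem.Int.band (Int.not x) 4294967295 >>> (p + 1)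
  if z = 0 then none else
  let q := p + 1 + PySem.Int.bitLength (PySem.Int.band z (-z)) - 1
  some (x - ((1 : Int) <<< p) + ((1 : Int) <<< q))

-- ===== PRECONDITION & SPEC =====
def Spec_next_higher (x : Int) (out : Option Int) : Prop := out = next_higher_alt x
instance (x : Int) (out : Option Int) : Decidable (Spec_next_higher x out) := by unfold Spec_next_higher; infer_instance

-- ===== CLAIM (what is proved, stated in full; the proofs are below) =====
def Claim_equal_next_higher : Prop := ∀ (x : Int), Dom_next_higher x → Spec_next_higher x (next_higher x)

-- ===== LEMMAS AND PROOFS =====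

-- "bit i of x is set", arithmetically (Python's (x >> i) & 1 == 1)
def bitI (x : Int) (i : Nat) : Prop := x / 2 ^ i % 2 = 1

theorem two_pow_pos (n : Nat) : (0 : Int) < 2 ^ n := by positivity

theorem one_shl (p : Nat) : ((1 : Int) <<< p) = 2 ^ p := by
  induction p with
  | zero => rfl
  | succ n ih => rw [Int.shiftLeft_succ, ih]; ring

theorem not_eq (x : Int) : Int.not x = -x - 1 := by
  cases x with
  | ofNat n => simp [Int.not, Int.negSucc_eq]; ring
  | negSucc n => simp [Int.not, Int.negSucc_eq]

theorem shr_eq (x : Int) (i : Nat) : x >>> i = x / 2 ^ i := by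
  rw [Int.shiftRight_eq_div_pow]; push_cast; rfl

-- (x >> i) & 1 = x / 2^i % 2
theorem cond_eq (x : Int) (i : Nat) : PySem.Int.band (x >>> i) 1 = x / 2 ^ i % 2 := by
  rw [PySem.Int.band_one, PySem.Int.mod_eq_emod_of_pos (by norm_num), shr_eq]

-- (-x-1) / c = -(x/c) - 1 for 0 < c (floor division)
theorem ediv_flip (x c : Int) (hc : 0 < c) : (-x - 1) / c = -(x / c) - 1 := by
  have h := Int.mul_ediv_add_emod x c
  have hr0 : 0 ≤ x % c := Int.emod_nonneg x (ne_of_gt hc)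
  have hrc : x % c < c := Int.emod_lt_of_pos x hc
  have key : -x - 1 = (c - 1 - x % c) + (-(x / c) - 1) * c := by linear_combination h
  rw [key, Int.add_mul_ediv_right _ _ (ne_of_gt hc),
    Int.ediv_eq_zero_of_lt (by linarith) (by linarith), zero_add]

-- bit flip: bit j of ~x is the complement of bit j of x
theorem bit_flip (x : Int) (j : Nat) : (-x - 1) / 2 ^ j % 2 = 1 - x / 2 ^ j % 2 := by
  rw [ediv_flip x _ (two_pow_pos j)]
  omega

-- masking with 2^32 - 1 is emod 2^32
theorem mask_emod (x : Int) : PySem.Int.band x 4294967295 = x % 4294967296 := by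
  have hb : ((4294967295 : Int)).toNat = 2 ^ 32 - 1 := rfl
  unfold PySem.Int.band
  by_cases hx : 0 ≤ x
  · rw [if_pos hx, if_pos (by norm_num : (0:Int) ≤ 4294967295), hb,
      Nat.and_two_pow_sub_one_eq_mod, Int.natCast_emod, Int.toNat_of_nonneg hx]
    norm_num
  · rw [if_neg hx, if_pos (by norm_num : (0:Int) ≤ 4294967295), hb]
    set m := (-x - 1).toNat with hm
    have hxm : x = -(m : Int) - 1 := by omega
    rw [Nat.land_comm, Nat.and_two_pow_sub_one_eq_mod]
    set k := m / 2 ^ 32 with hk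
    set r := m % 2 ^ 32 with hrr
    have hmr : 2 ^ 32 * k + r = m := Nat.div_add_mod m (2 ^ 32)
    have hrlt : r < 2 ^ 32 := Nat.mod_lt _ (by norm_num)
    have hsplit : x = (4294967296 - 1 - (r : Int)) + (-(k : Int) - 1) * 4294967296 := by
      rw [hxm]
      have : ((2 ^ 32 * k + r : Nat) : Int) = (m : Int) := by exact_mod_cast hmr
      push_cast at this
      linarith
    rw [hsplit, Int.add_mul_emod_self_right _ _ _,
      Int.emod_eq_of_lt (by push_cast; omega) (by push_cast; omega)]
    omega

-- bits below position c are unchanged by emod 2^c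
theorem emod_pow_bit (x : Int) (c j : Nat) (h : j < c) :
    x % 2 ^ c / 2 ^ j % 2 = x / 2 ^ j % 2 := by
  obtain ⟨d, rfl⟩ : ∃ d, c = j + (d + 1) := ⟨c - j - 1, by omega⟩
  have e1 : x % 2 ^ (j + (d + 1)) = x + (-(2 ^ (d + 1) * (x / 2 ^ (j + (d + 1))))) * 2 ^ j := by
    rw [Int.emod_def]; ring
  rw [e1, Int.add_mul_ediv_right _ _ (ne_of_gt (two_pow_pos j))]
  have e2 : x / 2 ^ j + -(2 ^ (d + 1) * (x / 2 ^ (j + (d + 1)))) =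
      x / 2 ^ j + 2 * -(2 ^ d * (x / 2 ^ (j + (d + 1)))) := by ring
  rw [e2, Int.add_mul_emod_self_left]

-- if bit p of x is set then x % 2^(p+1) ≥ 2^p
theorem emod_pow_ge (x : Int) (p : Nat) (h : bitI x p) : 2 ^ p ≤ x % 2 ^ (p + 1) := by
  have hb : x % 2 ^ (p + 1) / 2 ^ p % 2 = 1 := by
    rw [emod_pow_bit x (p + 1) p (by omega)]; exact h
  have hw0 : 0 ≤ x % 2 ^ (p + 1) := Int.emod_nonneg x (ne_of_gt (two_pow_pos _))
  have hwlt : x % 2 ^ (p + 1) < 2 ^ (p + 1) := Int.emod_lt_of_pos x (two_pow_pos _)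
  have h2 : x % 2 ^ (p + 1) / 2 ^ p < 2 := by
    rw [Int.ediv_lt_iff_lt_mul (two_pow_pos p)]
    calc x % 2 ^ (p + 1) < 2 ^ (p + 1) := hwlt
    _ = 2 * 2 ^ p := by ring
  have h3 : 0 ≤ x % 2 ^ (p + 1) / 2 ^ p := Int.ediv_nonneg hw0 (le_of_lt (two_pow_pos p))
  have h4 : (1 : Int) ≤ x % 2 ^ (p + 1) / 2 ^ p := by omega
  have := (Int.le_ediv_iff_mul_le (two_pow_pos p)).mp h4
  linarith

-- clearing bit p (p < j) does not change the quotient by 2^j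
theorem sub_pow_ediv (x : Int) (p j : Nat) (hp : bitI x p) (hj : p < j) :
    (x - 2 ^ p) / 2 ^ j = x / 2 ^ j := by
  have hr0 : 0 ≤ x % 2 ^ j := Int.emod_nonneg x (ne_of_gt (two_pow_pos j))
  have hrlt : x % 2 ^ j < 2 ^ j := Int.emod_lt_of_pos x (two_pow_pos j)
  have hdvd : ((2 : Int) ^ (p + 1)) ∣ 2 ^ j := pow_dvd_pow 2 (by omega)
  have hkey : x % 2 ^ j % 2 ^ (p + 1) = x % 2 ^ (p + 1) := Int.emod_emod_of_dvd x hdvd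
  have hge : (2 : Int) ^ p ≤ x % 2 ^ j := by
    by_cases hc : x % 2 ^ j < 2 ^ (p + 1)
    · have := Int.emod_eq_of_lt hr0 hc
      rw [this] at hkey
      rw [hkey]
      exact emod_pow_ge x p hp
    · have : (2 : Int) ^ p < 2 ^ (p + 1) := by
        have : (2 : Int) ^ (p + 1) = 2 * 2 ^ p := by ring
        have h2 := two_pow_pos p
        omega
      omega
  have hd := Int.emod_def x (2 ^ j)
  have e : x - 2 ^ p = (x % 2 ^ j - 2 ^ p) + (x / 2 ^ j) * 2 ^ j := by linear_combination -hd
  rw [e, Int.add_mul_ediv_right _ _ (ne_of_gt (two_pow_pos j)),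
    Int.ediv_eq_zero_of_lt (by linarith [two_pow_pos p]) (by linarith [two_pow_pos p]), zero_add]

theorem ediv_comp (w : Int) (a b : Nat) : w / 2 ^ a / 2 ^ b = w / 2 ^ (a + b) := by
  rw [Int.ediv_ediv_of_nonneg (le_of_lt (two_pow_pos a)), ← pow_add]

-- Nat: bits of 2^n * a + r (r < 2^n) split at position n
theorem tb_split (a r : Nat) {n : Nat} (h : r < 2 ^ n) (i : Nat) :
    (2 ^ n * a + r).testBit i = if i < n then r.testBit i else a.testBit (i - n) := by
  by_cases hi : i < n
  · obtain ⟨d, rfl⟩ : ∃ d, n = i + (d + 1) := ⟨n - i - 1, by omega⟩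
    rw [if_pos hi, Nat.testBit_eq_decide_div_mod_eq, Nat.testBit_eq_decide_div_mod_eq]
    have e : 2 ^ (i + (d + 1)) * a + r = r + 2 ^ (d + 1) * a * 2 ^ i := by ring
    rw [e, Nat.add_mul_div_right _ _ (Nat.pow_pos (n := i) (by omega))]
    have e2 : r / 2 ^ i + 2 ^ (d + 1) * a = r / 2 ^ i + 2 * (2 ^ d * a) := by ring
    rw [e2, Nat.add_mul_mod_self_left]
  · rw [if_neg hi, Nat.testBit_eq_decide_div_mod_eq, Nat.testBit_eq_decide_div_mod_eq]
    have e : (2 ^ n * a + r) / 2 ^ i = a / 2 ^ (i - n) := by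
      calc (2 ^ n * a + r) / 2 ^ i = (2 ^ n * a + r) / (2 ^ n * 2 ^ (i - n)) := by
            rw [← pow_add]; congr 2; omega
      _ = (2 ^ n * a + r) / 2 ^ n / 2 ^ (i - n) := (Nat.div_div_eq_div_mul _ _ _).symm
      _ = (a + r / 2 ^ n) / 2 ^ (i - n) := by rw [Nat.mul_add_div (Nat.pow_pos (n := n) (by omega))]
      _ = a / 2 ^ (i - n) := by rw [Nat.div_eq_of_lt h, Nat.add_zero]
    rw [e]

theorem lt_pow_of_testBit_false {r p : Nat} (h1 : r < 2 ^ (p + 1)) (h2 : r.testBit p = false) :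
    r < 2 ^ p := by
  rw [Nat.testBit_eq_decide_div_mod_eq] at h2
  have hne : ¬ (r / 2 ^ p % 2 = 1) := by simpa using h2
  have hlt : r / 2 ^ p < 2 := Nat.div_lt_of_lt_mul (by
    have : (2:Nat) ^ (p + 1) = 2 ^ p * 2 := by ring
    omega)
  have h0 : r / 2 ^ p = 0 := by
    set u := r / 2 ^ p with hu
    clear_value u
    omega
  have := (Nat.div_eq_zero_iff).mp h0
  rcases this with h | h
  · exact absurd h (Nat.pos_iff_ne_zero.mp (Nat.pow_pos (n := p) (by omega)))
  · exact h

theorem or_two_pow {m p : Nat} (h : m.testBit p = false) : 2 ^ p ||| m = m + 2 ^ p := by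
  have hm := Nat.div_add_mod m (2 ^ (p + 1))
  set a := m / 2 ^ (p + 1) with ha
  set r := m % 2 ^ (p + 1) with hr
  have hrlt : r < 2 ^ (p + 1) := Nat.mod_lt _ (Nat.pow_pos (by omega))
  have hrbit : r.testBit p = false := by
    rw [hr, Nat.testBit_mod_two_pow]
    simp [h]
  have hrp : r < 2 ^ p := lt_pow_of_testBit_false hrlt hrbit
  have hrp2 : r + 2 ^ p < 2 ^ (p + 1) := by
    have : (2:Nat) ^ (p + 1) = 2 ^ p + 2 ^ p := by ring
    omega
  apply Nat.eq_of_testBit_eq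
  intro i
  rw [Nat.testBit_lor, ← hm]
  have e2 : 2 ^ (p + 1) * a + r + 2 ^ p = 2 ^ (p + 1) * a + (r + 2 ^ p) := by ring
  have e3 : r + 2 ^ p = 2 ^ p * 1 + r := by ring
  rw [e2, tb_split a r hrlt, tb_split a (r + 2 ^ p) hrp2, e3, tb_split 1 r hrp,
    Nat.testBit_two_pow]
  by_cases h1 : i < p
  · simp [h1, show i < p + 1 by omega, show ¬ (p = i) by omega]
  · by_cases h2 : i = p
    · subst h2
      simp [hrbit]
    · have h3 : ¬ i < p + 1 := by omega
      simp [show ¬ i ≤ p by omega, show ¬ p = i by omega]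

theorem and_pred (p a : Nat) :
    (2 ^ (p + 1) * a + 2 ^ p) &&& (2 ^ (p + 1) * a + 2 ^ p - 1) = 2 ^ (p + 1) * a := by
  have hp1 : (1:Nat) ≤ 2 ^ p := Nat.pow_pos (n := p) (by omega)
  have e1 : 2 ^ (p + 1) * a + 2 ^ p - 1 = 2 ^ (p + 1) * a + (2 ^ p - 1) := by omega
  have h1 : (2:Nat) ^ p < 2 ^ (p + 1) := by
    have : (2:Nat) ^ (p + 1) = 2 ^ p + 2 ^ p := by ring
    omega
  have h2 : (2:Nat) ^ p - 1 < 2 ^ (p + 1) := by omega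
  have h3 : (0:Nat) < 2 ^ (p + 1) := Nat.pow_pos (by omega)
  apply Nat.eq_of_testBit_eq
  intro i
  rw [Nat.testBit_land, e1, tb_split a _ h1, tb_split a _ h2]
  have e0 : 2 ^ (p + 1) * a = 2 ^ (p + 1) * a + 0 := by omega
  rw [e0, tb_split a 0 h3]
  by_cases hi : i < p + 1
  · simp only [if_pos hi, Nat.testBit_two_pow, Nat.testBit_two_pow_sub_one, Nat.zero_testBit]
    by_cases hip : p = i <;> simp [hip]
  · simp [show ¬ i ≤ p by omega]

theorem bitI_toNat {w : Int} (hw : 0 ≤ w) (j : Nat) : bitI w j ↔ w.toNat.testBit j := by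
  have hcast : w = ((w.toNat : Nat) : Int) := (Int.toNat_of_nonneg hw).symm
  rw [Nat.testBit_eq_decide_div_mod_eq, decide_eq_true_iff]
  unfold bitI
  rw [hcast]
  constructor
  · intro h
    have : ((w.toNat / 2 ^ j % 2 : Nat) : Int) = 1 := by
      rw [Int.natCast_emod, Int.natCast_div]
      push_cast
      exact h
    exact_mod_cast this
  · intro h
    have : ((w.toNat / 2 ^ j % 2 : Nat) : Int) = 1 := by exact_mod_cast h
    rw [Int.natCast_emod, Int.natCast_div] at this
    push_cast at this
    exact this

-- W1: ~(1 << p) & x = x - 2^p when bit p of x is set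
theorem toNat_two_pow (q : Nat) : ((2 : Int) ^ q).toNat = 2 ^ q := by
  have e : ((2 : Int) ^ q) = ((2 ^ q : Nat) : Int) := by push_cast; ring
  rw [e, Int.toNat_natCast]

theorem ge_of_testBit {n k : Nat} (h : n.testBit k = true) : 2 ^ k ≤ n := by
  by_contra hc
  rw [Nat.testBit_eq_false_of_lt (by omega)] at h
  simp at h

-- W1: ~(1 << p) & x = x - 2^p when bit p of x is set
theorem clear_bit {x : Int} {p : Nat} (h : bitI x p) :
    PySem.Int.band (Int.not ((1 : Int) <<< p)) x = x - 2 ^ p := by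
  have hnot : Int.not ((1 : Int) <<< p) = -(2 ^ p) - 1 := by rw [one_shl, not_eq]
  have hneg : ¬ ((0:Int) ≤ -(2 ^ p) - 1) := by have := two_pow_pos p; omega
  rw [hnot]
  unfold PySem.Int.band
  rw [if_neg hneg]
  by_cases hx : 0 ≤ x
  · rw [if_pos hx]
    have hnn : (-(-(2 ^ p : Int) - 1) - 1).toNat = 2 ^ p := by
      have e : -(-(2 ^ p : Int) - 1) - 1 = (2 : Int) ^ p := by ring
      rw [e, toNat_two_pow]
    rw [hnn]
    have htb : x.toNat.testBit p = true := (bitI_toNat hx p).mp h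
    rw [Nat.and_two_pow, htb]
    have hge : 2 ^ p ≤ x.toNat := ge_of_testBit htb
    have e2 : ((x.toNat - Bool.true.toNat * 2 ^ p : Nat) : Int) = ↑x.toNat - 2 ^ p := by
      simp only [Bool.toNat_true, one_mul]
      push_cast [hge]
      ring
    rw [e2, Int.toNat_of_nonneg hx]
  · rw [if_neg hx]
    have hm0 : (0:Int) ≤ -x - 1 := by omega
    have hmm : (-(-(2 ^ p : Int) - 1) - 1).toNat = 2 ^ p := by
      have e : -(-(2 ^ p : Int) - 1) - 1 = (2 : Int) ^ p := by ring
      rw [e, toNat_two_pow]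
    rw [hmm]
    have hbitm : ¬ bitI (-x - 1) p := by
      unfold bitI at h ⊢
      rw [bit_flip]
      omega
    have htb : (-x - 1).toNat.testBit p = false := by
      cases htb' : (-x - 1).toNat.testBit p
      · rfl
      · exact absurd ((bitI_toNat hm0 p).mpr (by rw [htb'])) hbitm
    rw [or_two_pow htb]
    have e3 : (((-x - 1).toNat + 2 ^ p : Nat) : Int) = (-x - 1) + 2 ^ p := by
      push_cast
      rw [Int.toNat_of_nonneg hm0]
    rw [e3]
    ring

-- W2: x | (1 << q) = x + 2^q when bit q of x is clear
theorem set_bit {x : Int} {q : Nat} (h : ¬ bitI x q) :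
    PySem.Int.bor x ((1 : Int) <<< q) = x + 2 ^ q := by
  rw [one_shl]
  have h2q : (0:Int) ≤ 2 ^ q := le_of_lt (two_pow_pos q)
  unfold PySem.Int.bor
  by_cases hx : 0 ≤ x
  · rw [if_pos hx, if_pos h2q]
    have htb : x.toNat.testBit q = false := by
      cases htb' : x.toNat.testBit q
      · rfl
      · exact absurd ((bitI_toNat hx q).mpr (by rw [htb'])) h
    rw [toNat_two_pow, Nat.lor_comm, or_two_pow htb]
    push_cast
    rw [Int.toNat_of_nonneg hx]
  · rw [if_neg hx, if_pos h2q]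
    have hm0 : (0:Int) ≤ -x - 1 := by omega
    have hbitm : bitI (-x - 1) q := by
      unfold bitI at h ⊢
      rw [bit_flip]
      have := Int.emod_two_eq (x / 2 ^ q)
      omega
    have htb : (-x - 1).toNat.testBit q = true := (bitI_toNat hm0 q).mp hbitm
    rw [toNat_two_pow, Nat.and_two_pow, htb]
    have hge : 2 ^ q ≤ (-x - 1).toNat := ge_of_testBit htb
    have e3 : (((-x - 1).toNat - Bool.true.toNat * 2 ^ q : Nat) : Int) = (-x - 1) - 2 ^ q := by
      simp only [Bool.toNat_true, one_mul]
      push_cast [hge]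
      rw [Int.toNat_of_nonneg hm0]
    rw [e3]
    ring

-- y & -y isolates the lowest set bit
theorem lowbit {y : Int} (hy : 0 < y) {t b : Nat} (h : y.toNat = 2 ^ t * (2 * b + 1)) :
    PySem.Int.band y (-y) = 2 ^ t := by
  unfold PySem.Int.band
  rw [if_pos (le_of_lt hy), if_neg (by omega : ¬ ((0:Int) ≤ -y))]
  have h1 : (-(-y) - 1).toNat = y.toNat - 1 := by omega
  rw [h1]
  have hn : y.toNat = 2 ^ (t + 1) * b + 2 ^ t := by rw [h]; ring
  rw [hn, and_pred]
  have h3 : 2 ^ (t + 1) * b + 2 ^ t - 2 ^ (t + 1) * b = 2 ^ t := by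
    have e : (2:Nat) ^ (t + 1) = 2 ^ t * 2 := by ring
    omega
  rw [h3]
  push_cast
  ring

theorem bitLength_two_pow (t : Nat) : PySem.Int.bitLength ((2 : Int) ^ t) = t + 1 := by
  induction t with
  | zero => decide
  | succ n ih =>
    have hc : ((2:Int) ^ (n + 1)) = ((2 ^ (n + 1) : Nat) : Int) := by push_cast; ring
    rw [hc, PySem.Int.bitLength_natCast (Nat.pow_pos (by omega))]
    have hd : (2:Nat) ^ (n + 1) / 2 = 2 ^ n := by
      have e : (2:Nat) ^ (n + 1) = 2 ^ n * 2 := by ring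
      omega
    rw [hd]
    have hc2 : ((2 ^ n : Nat) : Int) = (2:Int) ^ n := by push_cast; ring
    rw [hc2, ih]

theorem exists_odd_fact {n : Nat} (h : n ≠ 0) : ∃ t b, n = 2 ^ t * (2 * b + 1) := by
  obtain ⟨k, m, hm, rfl⟩ := Nat.exists_eq_two_pow_mul_odd h
  obtain ⟨b, rfl⟩ := hm
  exact ⟨k, b, by ring⟩

-- loop characterizations
theorem nhLoop1_none (x : Int) (k i : Nat) (hk : 32 ≤ i + k)
    (h : ∀ j, i ≤ j → j < 32 → ¬ bitI x j) : nhLoop1 x i = none := by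
  induction k generalizing i with
  | zero => rw [nhLoop1, dif_neg (by omega : ¬ i < 32)]
  | succ n ih =>
    rw [nhLoop1]
    by_cases hi : i < 32
    · rw [dif_pos hi]
      have hc : PySem.Int.band (x >>> i) 1 = 0 := by
        rw [cond_eq]
        have h1 := h i (le_refl i) hi
        unfold bitI at h1
        have h2 := Int.emod_two_eq (x / 2 ^ i)
        omega
      rw [hc, if_neg (by simp : ¬ ((0:Int) ≠ 0))]
      exact ih (i + 1) (by omega) (fun j hj1 hj2 => h j (by omega) hj2)
    · rw [dif_neg hi]

theorem nhLoop1_some (x : Int) (p : Nat) (hp : p < 32) (hb : bitI x p) (k i : Nat)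
    (hk : 32 ≤ i + k) (hip : i ≤ p) (h : ∀ j, i ≤ j → j < p → ¬ bitI x j) :
    nhLoop1 x i = some (p, x - 2 ^ p) := by
  induction k generalizing i with
  | zero => omega
  | succ n ih =>
    rw [nhLoop1, dif_pos (by omega : i < 32)]
    by_cases hip' : i = p
    · subst hip'
      have hc : PySem.Int.band (x >>> i) 1 = 1 := by rw [cond_eq]; exact hb
      rw [hc, if_pos (by norm_num : (1:Int) ≠ 0), clear_bit hb]
    · have hc : PySem.Int.band (x >>> i) 1 = 0 := by
        rw [cond_eq]
        have h1 := h i (le_refl i) (by omega)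
        unfold bitI at h1
        have h2 := Int.emod_two_eq (x / 2 ^ i)
        omega
      rw [hc, if_neg (by simp : ¬ ((0:Int) ≠ 0))]
      exact ih (i + 1) (by omega) (by omega) (fun j hj1 hj2 => h j (by omega) hj2)

theorem nhLoop2_none (x : Int) (k i : Nat) (hk : 32 ≤ i + k)
    (h : ∀ j, i ≤ j → j < 32 → bitI x j) : nhLoop2 x i = none := by
  induction k generalizing i with
  | zero => rw [nhLoop2, dif_neg (by omega : ¬ i < 32)]
  | succ n ih =>
    rw [nhLoop2]
    by_cases hi : i < 32
    · rw [dif_pos hi]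
      have hc : PySem.Int.band (x >>> i) 1 = 1 := by rw [cond_eq]; exact h i (le_refl i) hi
      rw [hc, if_neg (by norm_num : ¬ ((1:Int) = 0))]
      exact ih (i + 1) (by omega) (fun j hj1 hj2 => h j (by omega) hj2)
    · rw [dif_neg hi]

theorem nhLoop2_some (x : Int) (q : Nat) (hq : q < 32) (hb : ¬ bitI x q) (k i : Nat)
    (hk : 32 ≤ i + k) (hiq : i ≤ q) (h : ∀ j, i ≤ j → j < q → bitI x j) :
    nhLoop2 x i = some (x + 2 ^ q) := by
  induction k generalizing i with
  | zero => omega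
  | succ n ih =>
    rw [nhLoop2, dif_pos (by omega : i < 32)]
    by_cases hiq' : i = q
    · subst hiq'
      have hc : PySem.Int.band (x >>> i) 1 = 0 := by
        rw [cond_eq]
        unfold bitI at hb
        have h2 := Int.emod_two_eq (x / 2 ^ i)
        omega
      rw [hc, if_pos rfl, set_bit hb]
    · have hc : PySem.Int.band (x >>> i) 1 = 1 := by
        rw [cond_eq]; exact h i (le_refl i) (by omega)
      rw [hc, if_neg (by norm_num : ¬ ((1:Int) = 0))]
      exact ih (i + 1) (by omega) (by omega) (fun j hj1 hj2 => h j (by omega) hj2)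

theorem main_eq (x : Int) : next_higher x = next_higher_alt x := by
  have hM : (4294967296 : Int) = 2 ^ 32 := by norm_num
  have hy0 : 0 ≤ x % 4294967296 := Int.emod_nonneg x (by norm_num)
  have hylt : x % 4294967296 < 4294967296 := Int.emod_lt_of_pos x (by norm_num)
  have hbit : ∀ j, j < 32 → x % 4294967296 / 2 ^ j % 2 = x / 2 ^ j % 2 := by
    intro j hj
    rw [hM]
    exact emod_pow_bit x 32 j hj
  by_cases h0 : x % 4294967296 = 0
  · have hA : nhLoop1 x 0 = none := by
      apply nhLoop1_none x 32 0 (by omega)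
      intro j _ hj
      unfold bitI
      rw [← hbit j hj, h0]
      norm_num
    unfold next_higher
    rw [hA]
    show (none : Option Int) = next_higher_alt x
    simp only [next_higher_alt, mask_emod]
    rw [if_pos h0]
  · have hYpos : 0 < x % 4294967296 := by omega
    have hn0 : (x % 4294967296).toNat ≠ 0 := by omega
    obtain ⟨t, b, hfact⟩ := exists_odd_fact hn0
    have hnlt : (x % 4294967296).toNat < 2 ^ 32 := by omega
    have h2t : 2 ^ t ≤ (x % 4294967296).toNat := by
      rw [hfact]
      calc 2 ^ t = 2 ^ t * 1 := by ring
      _ ≤ 2 ^ t * (2 * b + 1) := Nat.mul_le_mul_left _ (by omega)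
    have ht32 : t < 32 := by
      by_contra hc
      have : (2 : Nat) ^ 32 ≤ 2 ^ t := Nat.pow_le_pow_right (by omega) (by omega)
      omega
    have hsplit : (x % 4294967296).toNat = 2 ^ (t + 1) * b + 2 ^ t := by rw [hfact]; ring
    have htlt : (2 : Nat) ^ t < 2 ^ (t + 1) := by
      have : (2 : Nat) ^ (t + 1) = 2 ^ t + 2 ^ t := by ring
      have := Nat.pow_pos (a := 2) (n := t) (by omega)
      omega
    have hbxt : bitI x t := by
      unfold bitI
      rw [← hbit t ht32]
      have : bitI (x % 4294967296) t := by
        rw [bitI_toNat hy0, hsplit, tb_split b _ htlt, if_pos (by omega), Nat.testBit_two_pow]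
        simp
      exact this
    have hlow : ∀ j, j < t → ¬ bitI x j := by
      intro j hj
      unfold bitI
      rw [← hbit j (by omega)]
      have : ¬ bitI (x % 4294967296) j := by
        rw [bitI_toNat hy0, hsplit, tb_split b _ htlt, if_pos (by omega), Nat.testBit_two_pow]
        simp
        omega
      exact this
    have hA1 : nhLoop1 x 0 = some (t, x - 2 ^ t) :=
      nhLoop1_some x t ht32 hbxt 32 0 (by omega) (by omega) (fun j _ hj => hlow j hj)
    have hlowb : PySem.Int.band (x % 4294967296) (-(x % 4294967296)) = 2 ^ t :=
      lowbit hYpos hfact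
    have hw0 : 0 ≤ (-x - 1) % 4294967296 := Int.emod_nonneg _ (by norm_num)
    have hwlt : (-x - 1) % 4294967296 < 4294967296 := Int.emod_lt_of_pos _ (by norm_num)
    have hwbit : ∀ j, j < 32 → (-x - 1) % 4294967296 / 2 ^ j % 2 = 1 - x / 2 ^ j % 2 := by
      intro j hj
      rw [hM, emod_pow_bit _ 32 j hj, bit_flip]
    have hz0le : 0 ≤ (-x - 1) % 4294967296 / 2 ^ (t + 1) :=
      Int.ediv_nonneg hw0 (le_of_lt (two_pow_pos _))
    by_cases hz : (-x - 1) % 4294967296 / 2 ^ (t + 1) = 0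
    · have hwlt2 : (-x - 1) % 4294967296 < 2 ^ (t + 1) := by
        by_contra hc
        rw [not_lt] at hc
        have h1 : (1 : Int) ≤ (-x - 1) % 4294967296 / 2 ^ (t + 1) :=
          (Int.le_ediv_iff_mul_le (two_pow_pos _)).mpr (by linarith)
        omega
      have hall : ∀ j, t + 1 ≤ j → j < 32 → bitI (x - 2 ^ t) j := by
        intro j hj1 hj2
        unfold bitI
        rw [sub_pow_ediv x t j hbxt (by omega)]
        have hwj : (-x - 1) % 4294967296 / 2 ^ j = 0 :=
          Int.ediv_eq_zero_of_lt hw0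
            (lt_of_lt_of_le hwlt2 (pow_le_pow_right₀ (by norm_num : (1:Int) ≤ 2) (by omega)))
        have hb1 := hwbit j hj2
        rw [hwj] at hb1
        have h2 := Int.emod_two_eq (x / 2 ^ j)
        omega
      have hA2 : nhLoop2 (x - 2 ^ t) (t + 1) = none :=
        nhLoop2_none _ 32 (t + 1) (by omega) (fun j h1 h2 => hall j h1 h2)
      unfold next_higher
      rw [hA1]
      show nhLoop2 (x - 2 ^ t) (t + 1) = next_higher_alt x
      rw [hA2]
      simp only [next_higher_alt, mask_emod, not_eq]
      rw [if_neg h0, hlowb, bitLength_two_pow, Nat.add_sub_cancel, shr_eq, if_pos hz]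
    · have hzpos : 0 < (-x - 1) % 4294967296 / 2 ^ (t + 1) := by omega
      set m := ((-x - 1) % 4294967296 / 2 ^ (t + 1)).toNat with hmdef
      have hzm : ((m : Nat) : Int) = (-x - 1) % 4294967296 / 2 ^ (t + 1) :=
        Int.toNat_of_nonneg hz0le
      have hm0 : m ≠ 0 := by omega
      obtain ⟨u, c, hfz⟩ := exists_odd_fact hm0
      have hlowz : PySem.Int.band ((-x - 1) % 4294967296 / 2 ^ (t + 1))
          (-((-x - 1) % 4294967296 / 2 ^ (t + 1))) = 2 ^ u := lowbit hzpos hfz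
      -- bound: z < 2^(31-t), hence u < 31 - t and q = t+1+u < 32
      have hzlt : (-x - 1) % 4294967296 / 2 ^ (t + 1) < 2 ^ (31 - t) := by
        rw [Int.ediv_lt_iff_lt_mul (two_pow_pos _)]
        calc (-x - 1) % 4294967296 < 4294967296 := hwlt
        _ = 2 ^ (31 - t) * 2 ^ (t + 1) := by
              have e32 : 31 - t + (t + 1) = 32 := by omega
              rw [← pow_add, e32]
              norm_num
      have hmlt : m < 2 ^ (31 - t) := by
        have h1 : ((m : Nat) : Int) < ((2 ^ (31 - t) : Nat) : Int) := by
          rw [hzm]; push_cast; exact hzlt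
        exact_mod_cast h1
      have h2u : 2 ^ u ≤ m := by
        rw [hfz]
        calc 2 ^ u = 2 ^ u * 1 := by ring
        _ ≤ 2 ^ u * (2 * c + 1) := Nat.mul_le_mul_left _ (by omega)
      have hu31 : u < 31 - t := by
        by_contra hc
        have : (2 : Nat) ^ (31 - t) ≤ 2 ^ u := Nat.pow_le_pow_right (by omega) (by omega)
        omega
      have hq32 : t + 1 + u < 32 := by omega
      -- w / 2^(t+1+u) = (2c+1) is odd: bit q of x is clear
      have hdivq : (-x - 1) % 4294967296 / 2 ^ (t + 1 + u) = (2 * c + 1 : Nat) := by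
        rw [← ediv_comp _ (t + 1) u, ← hzm]
        have e1 : ((2 : Int) ^ u) = ((2 ^ u : Nat) : Int) := by push_cast; ring
        rw [e1, ← Int.natCast_div]
        rw [hfz, Nat.mul_div_cancel_left _ (Nat.pow_pos (by omega))]
      have hbq : ¬ bitI x (t + 1 + u) := by
        unfold bitI
        have hb1 := hwbit (t + 1 + u) hq32
        rw [hdivq] at hb1
        have : ((2 * c + 1 : Nat) : Int) % 2 = 1 := by push_cast; omega
        omega
      have hones : ∀ j, t + 1 ≤ j → j < t + 1 + u → bitI (x - 2 ^ t) j := by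
        intro j hj1 hj2
        unfold bitI
        rw [sub_pow_ediv x t j hbxt (by omega)]
        obtain ⟨k, rfl⟩ : ∃ k, j = t + 1 + k := ⟨j - (t + 1), by omega⟩
        have hku : k < u := by omega
        have hdivj : (-x - 1) % 4294967296 / 2 ^ (t + 1 + k) =
            ((2 ^ (u - k) * (2 * c + 1) : Nat) : Int) := by
          rw [← ediv_comp _ (t + 1) k, ← hzm]
          have e1 : ((2 : Int) ^ k) = ((2 ^ k : Nat) : Int) := by push_cast; ring
          rw [e1, ← Int.natCast_div]
          have e2 : m = 2 ^ k * (2 ^ (u - k) * (2 * c + 1)) := by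
            rw [hfz, ← mul_assoc, ← pow_add]
            congr 2
            omega
          rw [e2, Nat.mul_div_cancel_left _ (Nat.pow_pos (by omega))]
        have hb1 := hwbit (t + 1 + k) (by omega)
        rw [hdivj] at hb1
        have heven : ((2 ^ (u - k) * (2 * c + 1) : Nat) : Int) % 2 = 0 := by
          obtain ⟨d, hd⟩ : ∃ d, u - k = d + 1 := ⟨u - k - 1, by omega⟩
          rw [hd]
          push_cast [pow_succ]
          have e : (2:Int) ^ d * 2 * (2 * (c:Int) + 1) = 2 * ((2:Int) ^ d * (2 * (c:Int) + 1)) := by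
            ring
          rw [e]
          exact Int.mul_emod_right 2 _
        have h2 := Int.emod_two_eq (x / 2 ^ (t + 1 + k))
        omega
      have hbq' : ¬ bitI (x - 2 ^ t) (t + 1 + u) := by
        unfold bitI
        rw [sub_pow_ediv x t _ hbxt (by omega)]
        exact hbq
      have hA2 : nhLoop2 (x - 2 ^ t) (t + 1) = some ((x - 2 ^ t) + 2 ^ (t + 1 + u)) :=
        nhLoop2_some _ (t + 1 + u) hq32 hbq' 32 (t + 1) (by omega) (by omega)
          (fun j h1 h2 => hones j h1 h2)
      unfold next_higher
      rw [hA1]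
      show nhLoop2 (x - 2 ^ t) (t + 1) = next_higher_alt x
      rw [hA2]
      simp only [next_higher_alt, mask_emod, not_eq]
      rw [if_neg h0, hlowb, bitLength_two_pow, Nat.add_sub_cancel, shr_eq, if_neg hz, hlowz,
        bitLength_two_pow, one_shl, one_shl]
      have e : t + 1 + (u + 1) - 1 = t + 1 + u := by omega
      rw [e]

-- ===== VERDICT (by name: the statement is the Claim_ definition above) =====
theorem next_higher_spec : Claim_equal_next_higher := by
  intro x _
  unfold Spec_next_higher
  exact main_eq x
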